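-- pv_equiv track=rewrite | github.com/vlad0x00/multicell-rc | multicell_rc_utils/boolean_functions.py | nth_output_set
-- ===== SOURCE A (Python) =====
-- def nth_output_set(window_size, n):
--     input_combinations = 2**window_size
--     max_n = 2**input_combinations
--     assert n < max_n
--     bit = input_combinations
--     output_set = []
--     while bit > 0:
--         if n % 2 == 1:
--             output_set += [1]
--         else:
--             output_set += [0]
--         n = n // 2
--         bit -= 1
--     return tuple(reversed(output_set))
-- ===== SOURCE B (Python) =====
-- def nth_output_set(window_size, n):
--     input_combinations = 2**window_size
--     max_n = 2**input_combinations
--     assert n < max_n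
--     # divide and conquer: a block of 2**k bits is the concatenation of the
--     # high half (the floor-quotient by 2**2**(k-1)) and the low half (the
--     # remainder), recursing down to single bits; MSB-first by construction.
--     def bits(k, m):
--         if k == 0:
--             return (m % 2,)
--         q, r = divmod(m, 2**(2**(k-1)))
--         return bits(k - 1, q) + bits(k - 1, r)
--     return bits(window_size, n)
-- ===== Notes on version B (the rewrite author's own statement) =====
-- stated objective: alternative
-- what changed: B computes the bit tuple by divide-and-conquer: it splits n with divmod by 2**2**(k-1) into a high and a low half and recurses on each, concatenating the halves MSB-first, instead of A's iterative loop that peels one bit at a time with %2 and //2 and reverses at the end.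
-- outside the precondition, e.g. on nth_output_set(-1, 1): A returns (1,), B raises RecursionError
import Mathlib
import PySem

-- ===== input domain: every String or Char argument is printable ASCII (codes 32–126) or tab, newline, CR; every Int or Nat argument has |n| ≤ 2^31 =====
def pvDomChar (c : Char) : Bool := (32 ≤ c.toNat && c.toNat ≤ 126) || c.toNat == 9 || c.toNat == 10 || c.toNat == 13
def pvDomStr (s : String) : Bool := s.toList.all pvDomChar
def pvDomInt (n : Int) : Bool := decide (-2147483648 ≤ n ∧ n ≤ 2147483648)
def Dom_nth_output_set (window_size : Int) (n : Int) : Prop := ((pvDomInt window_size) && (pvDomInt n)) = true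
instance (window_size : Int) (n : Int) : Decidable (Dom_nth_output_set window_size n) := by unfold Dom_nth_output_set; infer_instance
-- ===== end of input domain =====

-- B builds the tuple by divide-and-conquer (divmod-split into high/low halves, recurse, concatenate
-- MSB-first) instead of A's iterative one-bit-at-a-time %2//2 loop plus reversal (objective: alternative).


-- ===== PORT A =====
-- the `while bit > 0` loop: bit counts down, n is halved, bits are appended LSB-first
def pvLoopA : Nat → Int → List Int → List Int
  | 0, _, acc => acc
  | b + 1, n, acc =>
      pvLoopA b (PySem.Int.floordiv n 2)
        (acc ++ [if PySem.Int.mod n 2 = 1 then 1 else 0])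

def nth_output_set (window_size : Int) (n : Int) : List Int :=
  -- input_combinations = 2**window_size; exact for window_size ≥ 0 (guaranteed by Pre_)
  let input_combinations : Int := 2 ^ window_size.toNat
  (pvLoopA input_combinations.toNat n []).reverse

-- ===== PORT B =====
-- `bits(k, m)`: q, r = divmod(m, 2**(2**(k-1))); bits(k-1, q) + bits(k-1, r)
def pvBitsB : Nat → Int → List Int
  | 0, m => [PySem.Int.mod m 2]
  | k + 1, m =>
      let d : Int := 2 ^ (2 ^ k)
      pvBitsB k (PySem.Int.floordiv m d) ++ pvBitsB k (PySem.Int.mod m d)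

def nth_output_set_alt (window_size : Int) (n : Int) : List Int :=
  pvBitsB window_size.toNat n

-- ===== PRECONDITION & SPEC =====
-- Pre_ excludes window_size < 0 (Python's 2**window_size is then a float: A returns a 1-tuple by a
-- float-arithmetic accident, B's recursion never terminates and raises RecursionError) and
-- n ≥ 2**2**window_size (A's assert raises). The second conjunct is A's `assert n < 2**2**window_size`;
-- the exponent is capped at window_size = 5 only so that it stays evaluable: within Dom (|n| ≤ 2^31 < 2^32)
-- the capped test is equivalent, since for window_size ≥ 5 the assert always passes there.
def Pre_nth_output_set (window_size : Int) (n : Int) : Prop :=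
  0 ≤ window_size ∧ (5 ≤ window_size ∨ n < (2 : Int) ^ (2 ^ window_size.toNat))
instance (window_size : Int) (n : Int) : Decidable (Pre_nth_output_set window_size n) := by
  unfold Pre_nth_output_set; infer_instance
def pvWitness_nth_output_set : Int × Int := (2, 5)

def Spec_nth_output_set (window_size : Int) (n : Int) (out : List Int) : Prop := out = nth_output_set_alt window_size n
instance (window_size : Int) (n : Int) (out : List Int) : Decidable (Spec_nth_output_set window_size n out) := by unfold Spec_nth_output_set; infer_instance

-- ===== CLAIM =====
def Claim_equal_nth_output_set : Prop := ∀ (window_size : Int) (n : Int), Dom_nth_output_set window_size n → Pre_nth_output_set window_size n → Spec_nth_output_set window_size n (nth_output_set window_size n)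

-- ===== LEMMAS AND PROOFS =====

theorem pvLoopA_acc (b : Nat) : ∀ (n : Int) (acc : List Int),
    pvLoopA b n acc = acc ++ pvLoopA b n [] := by
  induction b with
  | zero => intro n acc; simp [pvLoopA]
  | succ b ih =>
      intro n acc
      rw [pvLoopA, pvLoopA, ih (PySem.Int.floordiv n 2),
        ih (PySem.Int.floordiv n 2) ([] ++ [if PySem.Int.mod n 2 = 1 then 1 else 0])]
      simp

theorem pv_fd_fd (n : Int) (a : Nat) :
    PySem.Int.floordiv (PySem.Int.floordiv n 2) ((2:Int)^a) = PySem.Int.floordiv n ((2:Int)^(a+1)) := by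
  rw [PySem.Int.floordiv_eq_ediv_of_pos (by norm_num),
    PySem.Int.floordiv_eq_ediv_of_pos (by positivity),
    PySem.Int.floordiv_eq_ediv_of_pos (by positivity),
    Int.ediv_ediv_of_nonneg (by norm_num : (0:Int) ≤ 2)]
  ring_nf

theorem pv_mod_ml (n : Int) (a : Nat) :
    PySem.Int.mod (PySem.Int.mod n ((2:Int)^(a+1))) 2 = PySem.Int.mod n 2 := by
  rw [PySem.Int.mod_eq_emod_of_pos (by norm_num),
    PySem.Int.mod_eq_emod_of_pos (by positivity),
    PySem.Int.mod_eq_emod_of_pos (by norm_num),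
    Int.emod_emod_of_dvd n (dvd_pow_self 2 (Nat.succ_ne_zero a))]

theorem pv_fd_mod (n : Int) (a : Nat) :
    PySem.Int.floordiv (PySem.Int.mod n ((2:Int)^(a+1))) 2
      = PySem.Int.mod (PySem.Int.floordiv n 2) ((2:Int)^a) := by
  rw [PySem.Int.floordiv_eq_ediv_of_pos (by norm_num),
    PySem.Int.floordiv_eq_ediv_of_pos (by norm_num),
    PySem.Int.mod_eq_emod_of_pos (by positivity),
    PySem.Int.mod_eq_emod_of_pos (by positivity)]
  have h2 : n / 2 / 2^a = n / 2^(a+1) := by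
    rw [Int.ediv_ediv_of_nonneg (by norm_num : (0:Int) ≤ 2)]; ring_nf
  have h1 : n % ((2:Int)^(a+1)) = n % 2 + ((n/2) % 2^a) * 2 := by
    rw [Int.emod_def n ((2:Int)^(a+1)), Int.emod_def (n/2), Int.emod_def n 2, h2]
    ring
  rw [h1, Int.add_mul_ediv_right _ _ (by norm_num : (2:Int) ≠ 0),
    Int.ediv_eq_zero_of_lt (Int.emod_nonneg n (by norm_num)) (Int.emod_lt_of_pos n (by norm_num)),
    zero_add]

theorem pvLoopA_split (a b : Nat) : ∀ (n : Int) (acc : List Int),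
    pvLoopA (a + b) n acc
      = pvLoopA b (PySem.Int.floordiv n ((2 : Int) ^ a)) (pvLoopA a n acc) := by
  induction a with
  | zero =>
      intro n acc
      simp [pvLoopA]
  | succ a ih =>
      intro n acc
      have hn : a + 1 + b = (a + b) + 1 := by omega
      rw [hn, pvLoopA, ih, pv_fd_fd, pvLoopA]

theorem pvLoopA_mod (a : Nat) : ∀ (n : Int),
    pvLoopA a (PySem.Int.mod n ((2 : Int) ^ a)) [] = pvLoopA a n [] := by
  induction a with
  | zero => intro n; simp [pvLoopA]
  | succ a ih =>
      intro n
      rw [pvLoopA, pvLoopA, pvLoopA_acc, pvLoopA_acc _ (PySem.Int.floordiv n 2),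
        pv_mod_ml, pv_fd_mod, ih]

theorem pvBitsB_eq (k : Nat) : ∀ (n : Int),
    pvBitsB k n = (pvLoopA (2 ^ k) n []).reverse := by
  induction k with
  | zero =>
      intro n
      rcases Int.emod_two_eq n with h | h <;>
        simp [pvBitsB, pvLoopA, h]
  | succ k ih =>
      intro n
      have h2 : 2 ^ (k+1) = 2 ^ k + 2 ^ k := by rw [pow_succ]; omega
      rw [h2, pvLoopA_split, pvLoopA_acc, ← pvLoopA_mod (2^k) n]
      simp only [pvBitsB, List.reverse_append, ih]

-- ===== VERDICT =====
theorem nth_output_set_spec : Claim_equal_nth_output_set := by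
  intro w n _ _
  unfold Spec_nth_output_set
  simp only [nth_output_set, nth_output_set_alt]
  have hic : (2 : Int) ^ w.toNat = ((2 ^ w.toNat : Nat) : Int) := by push_cast; ring
  rw [hic, Int.toNat_natCast, pvBitsB_eq]
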